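-- pv_equiv track=rewrite | github.com/EladEladFixler46/R2G-Empirical-Evaluation | src/r2g_eval/data.py | _attribute_counter
-- ===== SOURCE A (Python) =====
-- def _attribute_counter(rows: list[dict[str, str]], idx: int) -> int:
--     target = rows[idx]
--     count = 0
--     for attr, value in target.items():
--         for j, other in enumerate(rows):
--             if j == idx:
--                 continue
--             if other.get(attr) == value:
--                 count += 1
--                 break
--     return count
-- ===== SOURCE B (Python) =====
-- def _attribute_counter(rows: list[dict[str, str]], idx: int) -> int:
--     target = rows[idx]
--     index: dict[str, set[str]] = {}
--     for j, other in enumerate(rows):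
--         if j == idx:
--             continue
--         for a, v in other.items():
--             index.setdefault(a, set()).add(v)
--     return sum(1 for a, v in target.items() if v in index.get(a, ()))
-- ===== Notes on version B (the rewrite author's own statement) =====
-- stated objective: faster
-- what changed: Instead of re-scanning all other rows for every attribute of the target, B builds a dict mapping each attribute to the set of values seen in the other rows in one pass, then counts the target's attributes with a single membership lookup each.
import Mathlib
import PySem

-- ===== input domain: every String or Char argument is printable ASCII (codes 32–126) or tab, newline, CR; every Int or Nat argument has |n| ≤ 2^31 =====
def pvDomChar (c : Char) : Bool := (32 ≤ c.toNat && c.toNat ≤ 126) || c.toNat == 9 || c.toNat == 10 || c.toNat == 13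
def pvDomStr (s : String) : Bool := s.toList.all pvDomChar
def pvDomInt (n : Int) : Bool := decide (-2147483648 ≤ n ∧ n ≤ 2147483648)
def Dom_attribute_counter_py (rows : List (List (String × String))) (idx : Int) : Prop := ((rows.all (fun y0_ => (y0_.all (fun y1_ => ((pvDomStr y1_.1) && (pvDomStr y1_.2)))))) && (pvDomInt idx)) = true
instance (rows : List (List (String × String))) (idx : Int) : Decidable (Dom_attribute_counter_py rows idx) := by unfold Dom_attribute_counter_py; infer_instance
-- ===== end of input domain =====

-- B replaces A's per-attribute rescans of all rows with one pass building an attribute→value-set index, then counts by lookup.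


-- ===== PORT A =====
-- inner 'for j, other in enumerate(rows): if j == idx: continue; if other.get(attr) == value: count += 1; break'
def pvInnerA (idx : Int) (attr value : String) : List (Int × List (String × String)) → Bool
  | [] => false
  | (j, other) :: rest =>
    if j = idx then pvInnerA idx attr value rest
    else if (PySem.Dict.ofList other).get? attr == some value then true
    else pvInnerA idx attr value rest

def attribute_counter_py (rows : List (List (String × String))) (idx : Int) : Int :=
  let target := PySem.Dict.ofList (PySem.List.pyGetD rows idx [])
  target.items.foldl
    (fun count p => if pvInnerA idx p.1 p.2 (PySem.List.enumerate rows 0) then count + 1 else count) 0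

-- ===== PORT B =====
-- index.setdefault(a, set()).add(v) over all rows j ≠ idx
def pvBuildIndex (idx : Int) (enumRows : List (Int × List (String × String))) :
    PySem.Dict String (PySem.Set String) :=
  enumRows.foldl
    (fun ind p =>
      if p.1 = idx then ind
      else (PySem.Dict.ofList p.2).items.foldl
        (fun ind q => ind.insert q.1 (PySem.Set.add (ind.getD q.1 PySem.Set.empty) q.2)) ind)
    PySem.Dict.empty

def attribute_counter_py_alt (rows : List (List (String × String))) (idx : Int) : Int :=
  let target := PySem.Dict.ofList (PySem.List.pyGetD rows idx [])
  let index := pvBuildIndex idx (PySem.List.enumerate rows 0)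
  target.items.foldl
    (fun count p => if PySem.Set.contains (index.getD p.1 PySem.Set.empty) p.2 then count + 1 else count) 0

-- ===== PRECONDITION & SPEC =====
-- Pre_: rows[idx] must not raise IndexError (Python list indexing, negative indices allowed)
def Pre_attribute_counter_py (rows : List (List (String × String))) (idx : Int) : Prop :=
  PySem.Raise.InRange rows.length idx
instance (rows : List (List (String × String))) (idx : Int) : Decidable (Pre_attribute_counter_py rows idx) := by unfold Pre_attribute_counter_py; infer_instance

def pvWitness_attribute_counter_py : (List (List (String × String))) × Int :=
  ([[("a", "x"), ("b", "y")], [("a", "x")]], 0)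

def Spec_attribute_counter_py (rows : List (List (String × String))) (idx : Int) (out : Int) : Prop := out = attribute_counter_py_alt rows idx
instance (rows : List (List (String × String))) (idx : Int) (out : Int) : Decidable (Spec_attribute_counter_py rows idx out) := by unfold Spec_attribute_counter_py; infer_instance

-- ===== CLAIM (what is proved, stated in full; the proofs are below) =====
def Claim_equal_attribute_counter_py : Prop := ∀ (rows : List (List (String × String))) (idx : Int), Dom_attribute_counter_py rows idx → Pre_attribute_counter_py rows idx → Spec_attribute_counter_py rows idx (attribute_counter_py rows idx)

-- ===== LEMMAS AND PROOFS =====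

-- one row's inner loop: what ends up in the index entry for attribute a
theorem pv_mem_getD_row_foldl (items : List (String × String)) (ind : PySem.Dict String (PySem.Set String))
    (a v : String) :
    (v ∈ (items.foldl (fun ind q => ind.insert q.1 (PySem.Set.add (ind.getD q.1 PySem.Set.empty) q.2)) ind).getD a PySem.Set.empty)
    ↔ (v ∈ ind.getD a PySem.Set.empty ∨ (a, v) ∈ items) := by
  induction items generalizing ind with
  | nil => simp
  | cons q rest ih =>
    obtain ⟨q1, q2⟩ := q
    rw [List.foldl_cons, ih, PySem.Dict.getD_insert]
    by_cases h : a = q1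
    · subst h
      simp [PySem.Set.mem_add, List.mem_cons, Prod.mk.injEq, or_assoc]
    · simp only [if_neg h, List.mem_cons, Prod.mk.injEq]
      constructor
      · rintro (h1 | h1)
        · exact Or.inl h1
        · exact Or.inr (Or.inr h1)
      · rintro (h1 | (⟨rfl, rfl⟩ | h1))
        · exact Or.inl h1
        · exact absurd rfl h
        · exact Or.inr h1

-- the full index: v ∈ index[a] ↔ some row other than idx has (a, v)
theorem pv_mem_buildIndex_from (idx : Int) (L : List (Int × List (String × String)))
    (ind : PySem.Dict String (PySem.Set String)) (a v : String) :
    (v ∈ (L.foldl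
      (fun ind p =>
        if p.1 = idx then ind
        else (PySem.Dict.ofList p.2).items.foldl
          (fun ind q => ind.insert q.1 (PySem.Set.add (ind.getD q.1 PySem.Set.empty) q.2)) ind) ind).getD a PySem.Set.empty)
    ↔ (v ∈ ind.getD a PySem.Set.empty ∨ ∃ p ∈ L, p.1 ≠ idx ∧ (PySem.Dict.ofList p.2).get? a = some v) := by
  induction L generalizing ind with
  | nil => simp
  | cons p rest ih =>
    rw [List.foldl_cons]
    by_cases h : p.1 = idx
    · rw [if_pos h, ih]
      constructor
      · rintro (h1 | ⟨q, hq, hq1, hq2⟩)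
        · exact Or.inl h1
        · exact Or.inr ⟨q, List.mem_cons_of_mem _ hq, hq1, hq2⟩
      · rintro (h1 | ⟨q, hq, hq1, hq2⟩)
        · exact Or.inl h1
        · rcases List.mem_cons.mp hq with rfl | hq'
          · exact absurd h hq1
          · exact Or.inr ⟨q, hq', hq1, hq2⟩
    · rw [if_neg h, ih, pv_mem_getD_row_foldl,
        ← PySem.Dict.get?_eq_some_iff_mem_items (PySem.Dict.ofList p.2) a v (PySem.Dict.nodup_keys_ofList p.2)]
      constructor
      · rintro ((h1 | h1) | ⟨q, hq, hq1, hq2⟩)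
        · exact Or.inl h1
        · exact Or.inr ⟨p, List.mem_cons_self .., h, h1⟩
        · exact Or.inr ⟨q, List.mem_cons_of_mem _ hq, hq1, hq2⟩
      · rintro (h1 | ⟨q, hq, hq1, hq2⟩)
        · exact Or.inl (Or.inl h1)
        · rcases List.mem_cons.mp hq with rfl | hq'
          · exact Or.inl (Or.inr hq2)
          · exact Or.inr ⟨q, hq', hq1, hq2⟩

-- A's inner break loop is an existence test
theorem pv_innerA_iff (idx : Int) (a v : String) (L : List (Int × List (String × String))) :
    pvInnerA idx a v L = true ↔ ∃ p ∈ L, p.1 ≠ idx ∧ (PySem.Dict.ofList p.2).get? a = some v := by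
  induction L with
  | nil => simp [pvInnerA]
  | cons p rest ih =>
    obtain ⟨j, other⟩ := p
    simp only [pvInnerA]
    by_cases h : j = idx
    · rw [if_pos h, ih]
      constructor
      · rintro ⟨q, hq, hq1, hq2⟩
        exact ⟨q, List.mem_cons_of_mem _ hq, hq1, hq2⟩
      · rintro ⟨q, hq, hq1, hq2⟩
        rcases List.mem_cons.mp hq with rfl | hq'
        · exact absurd h hq1
        · exact ⟨q, hq', hq1, hq2⟩
    · rw [if_neg h]
      by_cases h2 : (PySem.Dict.ofList other).get? a = some v
      · rw [if_pos (by simpa using h2)]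
        simp only [true_iff]
        exact ⟨(j, other), List.mem_cons_self .., h, h2⟩
      · rw [if_neg (by simpa using h2), ih]
        constructor
        · rintro ⟨q, hq, hq1, hq2⟩
          exact ⟨q, List.mem_cons_of_mem _ hq, hq1, hq2⟩
        · rintro ⟨q, hq, hq1, hq2⟩
          rcases List.mem_cons.mp hq with rfl | hq'
          · exact absurd hq2 h2
          · exact ⟨q, hq', hq1, hq2⟩

-- ===== VERDICT (by name: the statement is the Claim_ definition above) =====
theorem attribute_counter_py_spec : Claim_equal_attribute_counter_py := by
  intro rows idx _ _
  unfold Spec_attribute_counter_py attribute_counter_py attribute_counter_py_alt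
  apply PySem.List.foldl_congr_mem
  intro acc p _
  have hiff : pvInnerA idx p.1 p.2 (PySem.List.enumerate rows 0)
      = PySem.Set.contains ((pvBuildIndex idx (PySem.List.enumerate rows 0)).getD p.1 PySem.Set.empty) p.2 := by
    rw [Bool.eq_iff_iff, pv_innerA_iff, PySem.Set.contains_iff]
    unfold pvBuildIndex
    rw [pv_mem_buildIndex_from]
    simp
  rw [hiff]
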